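-- pv_equiv track=rewrite | github.com/gcobb321/icloud3 | custom_components/icloud3/startup/config_file.py | _place_item_before
-- ===== SOURCE A (Python) =====
-- def _place_item_before(item, conf_dict, default_item):
--     # Cycle thru conf\dict (ex: DEFAULT_GENERAL_CONF) items and get the name of the next
--     # item to place the new one in the same position
--
--     before_item = default_item
--     _item_found = False
--
--     for _item in conf_dict:
--         if _item_found:
--             return _item
--
--         if _item == item:
--             _item_found = True
--
--     return default_item
-- ===== SOURCE B (Python) =====
-- def _place_item_before(item, conf_dict, default_item):
--     keys = list(conf_dict)
--     successor = dict(zip(keys, keys[1:]))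
--     return successor.get(item, default_item)
-- ===== Notes on version B (the rewrite author's own statement) =====
-- stated objective: idiomatic
-- what changed: Instead of scanning with a boolean found-flag, B builds a successor map dict(zip(keys, keys[1:])) once and answers with a single dict lookup successor.get(item, default_item); correctness relies on dict-key uniqueness.
import Mathlib
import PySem

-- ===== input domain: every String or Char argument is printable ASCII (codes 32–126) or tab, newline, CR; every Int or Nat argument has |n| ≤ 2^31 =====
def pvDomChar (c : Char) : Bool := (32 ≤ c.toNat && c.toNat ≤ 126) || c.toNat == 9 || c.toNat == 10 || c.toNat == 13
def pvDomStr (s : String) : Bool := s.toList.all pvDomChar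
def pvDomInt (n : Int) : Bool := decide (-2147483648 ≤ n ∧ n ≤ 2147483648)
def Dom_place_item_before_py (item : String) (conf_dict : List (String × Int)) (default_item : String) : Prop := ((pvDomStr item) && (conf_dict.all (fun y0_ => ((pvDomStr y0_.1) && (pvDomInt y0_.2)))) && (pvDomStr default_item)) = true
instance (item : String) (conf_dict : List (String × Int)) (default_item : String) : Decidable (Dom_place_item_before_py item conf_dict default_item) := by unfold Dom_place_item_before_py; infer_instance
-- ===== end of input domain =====

-- B replaces A's boolean found-flag scan with building a successor dictionary
-- dict(zip(keys, keys[1:])) once and answering by a single dict lookup; same O(n) cost.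

set_option maxRecDepth 4096

-- ===== PORT A =====
-- A's for-loop over the dict keys carrying the _item_found flag.
def placeA_loop (item : String) (default_item : String) : List String → Bool → String
  | [], _ => default_item
  | k :: ks, found => if found then k else placeA_loop item default_item ks (k == item)

def place_item_before_py (item : String) (conf_dict : List (String × Int)) (default_item : String) : String :=
  placeA_loop item default_item (conf_dict.map Prod.fst) false

-- ===== PORT B =====
-- successor = dict(zip(keys, keys[1:]))  (keys[1:] is keys.tail);  successor.get(item, default_item)
def place_item_before_py_alt (item : String) (conf_dict : List (String × Int)) (default_item : String) : String :=
  let keys := conf_dict.map Prod.fst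
  let successor := PySem.Dict.ofList (keys.zip keys.tail)
  successor.getD item default_item

-- ===== PRECONDITION & SPEC =====
-- Pre_ excludes association lists with a repeated key: a Python dict cannot contain
-- duplicate keys, so such lists represent no actual input of A.
def Pre_place_item_before_py (item : String) (conf_dict : List (String × Int)) (default_item : String) : Prop :=
  (conf_dict.map Prod.fst).Nodup
instance (item : String) (conf_dict : List (String × Int)) (default_item : String) : Decidable (Pre_place_item_before_py item conf_dict default_item) := by unfold Pre_place_item_before_py; infer_instance

def pvWitness_place_item_before_py : String × (List (String × Int)) × String :=
  ("a", [("a", 1), ("b", 2)], "z")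

def Spec_place_item_before_py (item : String) (conf_dict : List (String × Int)) (default_item : String) (out : String) : Prop := out = place_item_before_py_alt item conf_dict default_item
instance (item : String) (conf_dict : List (String × Int)) (default_item : String) (out : String) : Decidable (Spec_place_item_before_py item conf_dict default_item out) := by unfold Spec_place_item_before_py; infer_instance

-- ===== CLAIM (what is proved, stated in full; the proofs are below) =====
def Claim_equal_place_item_before_py : Prop := ∀ (item : String) (conf_dict : List (String × Int)) (default_item : String), Dom_place_item_before_py item conf_dict default_item → Pre_place_item_before_py item conf_dict default_item → Spec_place_item_before_py item conf_dict default_item (place_item_before_py item conf_dict default_item)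

-- ===== LEMMAS AND PROOFS =====

-- proof-side helper: first-match lookup with default over a pair list
def firstLookup (item default_item : String) : List (String × String) → String
  | [] => default_item
  | (p, n) :: rest => if p == item then n else firstLookup item default_item rest

theorem firstLookup_of_not_mem (item d : String) (ps : List (String × String))
    (h : item ∉ ps.map Prod.fst) : firstLookup item d ps = d := by
  induction ps with
  | nil => rfl
  | cons p rest ih =>
    obtain ⟨k, v⟩ := p
    simp only [List.map_cons, List.mem_cons, not_or] at h
    simp only [firstLookup]
    rw [if_neg (by simp only [beq_iff_eq]; exact fun e => h.1 e.symm), ih h.2]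

-- A's flag loop equals the first-match lookup over the zipped successor pairs.
theorem placeA_eq_firstLookup (item default_item : String) (ks : List String) :
    placeA_loop item default_item ks false = firstLookup item default_item (ks.zip ks.tail) := by
  induction ks with
  | nil => simp [placeA_loop, firstLookup]
  | cons k ks ih =>
    cases ks with
    | nil =>
      simp only [placeA_loop]
      cases h : (k == item) <;> simp [firstLookup]
    | cons k' ks' =>
      simp only [placeA_loop]
      cases h : (k == item) with
      | true => simp [List.zip, firstLookup, h]
      | false => simpa [List.zip, firstLookup, h] using ih

-- with pairwise-distinct keys, the fold of inserts behaves as first-match lookup over the pairs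
theorem getD_foldl_insert_nodup (item d : String) (ps : List (String × String))
    (h : (ps.map Prod.fst).Nodup) (d0 : PySem.Dict String String) :
    (ps.foldl (fun acc p => acc.insert p.1 p.2) d0).getD item d =
      if item ∈ ps.map Prod.fst then firstLookup item d ps else d0.getD item d := by
  induction ps generalizing d0 with
  | nil => simp
  | cons p rest ih =>
    obtain ⟨k, v⟩ := p
    simp only [List.map_cons, List.nodup_cons] at h
    simp only [List.foldl_cons, ih h.2, List.map_cons, List.mem_cons, firstLookup]
    by_cases hk : item = k
    · subst hk
      rw [if_neg h.1, if_pos (Or.inl rfl), if_pos (beq_self_eq_true _),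
        PySem.Dict.getD_insert, if_pos rfl]
    · by_cases hm : item ∈ rest.map Prod.fst
      · rw [if_pos hm, if_pos (Or.inr hm), if_neg (by simp only [beq_iff_eq]; exact fun e => hk e.symm)]
      · rw [if_neg hm, if_neg (by tauto), PySem.Dict.getD_insert, if_neg hk]

theorem map_fst_zip_sublist {α β : Type} (l1 : List α) (l2 : List β) :
    ((l1.zip l2).map Prod.fst).Sublist l1 := by
  induction l1 generalizing l2 with
  | nil => simp
  | cons a l1 ih =>
    cases l2 with
    | nil => simp
    | cons b l2 => simpa [List.zip] using (ih l2).cons₂ a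

-- ===== VERDICT (by name: the statement is the Claim_ definition above) =====
theorem place_item_before_py_spec : Claim_equal_place_item_before_py := by
  intro item conf_dict default_item _ hpre
  unfold Spec_place_item_before_py place_item_before_py place_item_before_py_alt
  set ks := conf_dict.map Prod.fst with hks
  have hnodup : ((ks.zip ks.tail).map Prod.fst).Nodup :=
    (hpre : ks.Nodup).sublist (map_fst_zip_sublist ks ks.tail)
  show placeA_loop item default_item ks false = (PySem.Dict.ofList (ks.zip ks.tail)).getD item default_item
  rw [placeA_eq_firstLookup]
  have h := getD_foldl_insert_nodup item default_item (ks.zip ks.tail) hnodup PySem.Dict.empty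
  rw [PySem.Dict.ofList, PySem.Dict.update, h]
  by_cases hm : item ∈ (ks.zip ks.tail).map Prod.fst
  · rw [if_pos hm]
  · rw [if_neg hm, PySem.Dict.getD_empty, firstLookup_of_not_mem item default_item _ hm]
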